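-- pv_equiv track=rewrite | github.com/LukaSveigl/ULFRI-undergrad-coursework | year1/semester-1/programming-1 (P1)/Covid-19/testi.py | zlati_prinasalec
-- ===== SOURCE A (Python) =====
-- def zlati_prinasalec(skupine):
--     people = set([inner for outer in skupine for inner in outer])
--     max_ime = ""
--     max_okuzb = 0
--     for p in people:
--         okuzenih = 0
--         for s in skupine:
--             if p in s:
--                 okuzenih += len(s) - 1
--         if max_okuzb == okuzenih:
--             max_okuzb = okuzenih
--             max_ime = min(max_ime, p)
--         elif max_okuzb < okuzenih:
--             max_okuzb = okuzenih
--             max_ime = p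
--     return max_ime
-- ===== SOURCE B (Python) =====
-- def zlati_prinasalec(skupine):
--     # One pass over the groups building a totals dict, then a single
--     # strict-'>' scan over the sorted names.
--     total = {}
--     for s in skupine:
--         w = len(s) - 1
--         for p in set(s):
--             total[p] = total.get(p, 0) + w
--     best_name = ""
--     best_val = 0
--     for p in sorted(total):
--         if total[p] > best_val:
--             best_name = p
--             best_val = total[p]
--     return best_name
-- ===== Notes on version B (the rewrite author's own statement) =====
-- stated objective: faster
-- what changed: A rescans every group once per distinct person (nested membership scans over an unordered set, with a min tie-break folded into the loop); B makes one pass over the groups accumulating per-person totals in a dict, then a single strict-'>' scan over the sorted names, which yields the same smallest-name-among-maxima and empty-string-on-zero-max result.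
import Mathlib
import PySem

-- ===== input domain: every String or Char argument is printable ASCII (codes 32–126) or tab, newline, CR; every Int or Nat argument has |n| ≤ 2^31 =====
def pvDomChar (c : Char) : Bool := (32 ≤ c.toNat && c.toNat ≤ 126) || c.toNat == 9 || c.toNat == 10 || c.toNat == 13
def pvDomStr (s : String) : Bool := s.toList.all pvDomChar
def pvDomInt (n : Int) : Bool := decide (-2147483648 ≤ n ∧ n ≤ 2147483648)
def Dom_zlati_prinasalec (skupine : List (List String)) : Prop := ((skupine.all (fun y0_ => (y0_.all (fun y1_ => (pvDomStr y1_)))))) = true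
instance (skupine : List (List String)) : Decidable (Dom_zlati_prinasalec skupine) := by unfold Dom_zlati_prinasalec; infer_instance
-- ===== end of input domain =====

-- B replaces A's per-person rescan of all groups by one pass over the groups
-- building a totals dict, followed by a single strict-'>' scan over the sorted
-- names; objective: faster (fewer passes).

-- ===== PORT A =====
-- A's inner loop: okuzenih accumulated over all groups containing p
def pvTotA (skupine : List (List String)) (p : String) : Int :=
  skupine.foldl (fun okuzenih s =>
    if p ∈ s then okuzenih + ((s.length : Int) - 1) else okuzenih) 0

def zlati_prinasalec (skupine : List (List String)) : String :=
  let people : PySem.Set String := PySem.Set.ofList (skupine.flatMap (fun outer => outer))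
  -- Python's set iteration order is not modelled; the lemmas below show the
  -- result of this loop does not depend on the traversal order
  let r := people.foldl (fun (acc : String × Int) p =>
      let okuzenih := pvTotA skupine p
      if acc.2 == okuzenih then (min acc.1 p, okuzenih)
      else if acc.2 < okuzenih then (p, okuzenih)
      else acc) ("", 0)
  r.1

-- ===== PORT B =====
def zlati_prinasalec_alt (skupine : List (List String)) : String :=
  let total : PySem.Dict String Int := skupine.foldl (fun d s =>
      (PySem.Set.ofList s).foldl
        (fun d p => d.modify p 0 (fun x => x + ((s.length : Int) - 1))) d)
    PySem.Dict.empty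
  -- total[p]: p ranges over total's keys, so getD equals the Python lookup here
  let r := (PySem.List.sorted total.keys (fun x => x) false).foldl
      (fun (acc : String × Int) p =>
        if acc.2 < total.getD p 0 then (p, total.getD p 0) else acc) ("", 0)
  r.1

-- ===== PRECONDITION & SPEC =====
def Spec_zlati_prinasalec (skupine : List (List String)) (out : String) : Prop := out = zlati_prinasalec_alt skupine
instance (skupine : List (List String)) (out : String) : Decidable (Spec_zlati_prinasalec skupine out) := by unfold Spec_zlati_prinasalec; infer_instance

-- ===== CLAIM (what is proved, stated in full; the proofs are below) =====
def Claim_equal_zlati_prinasalec : Prop := ∀ (skupine : List (List String)), Dom_zlati_prinasalec skupine → Spec_zlati_prinasalec skupine (zlati_prinasalec skupine)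

-- ===== LEMMAS AND PROOFS =====

def pvVmax (f : String → Int) (L : List String) : Int :=
  L.foldl (fun v p => max v (f p)) 0

def pvCmin (l : List String) : Option String :=
  l.foldl (fun o p => some (match o with | none => p | some q => min q p)) none

theorem pv_empty_le (s : String) : ("" : String) ≤ s := by
  rw [String.le_iff_toList_le]
  cases h : s.toList with
  | nil => exact le_refl _
  | cons a t => exact le_of_lt (List.nil_lt_cons a t)

theorem pvVmax_append (f : String → Int) (L : List String) (p : String) :
    pvVmax f (L ++ [p]) = max (pvVmax f L) (f p) := by
  simp [pvVmax, List.foldl_append]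

theorem pvVmax_nonneg (f : String → Int) (L : List String) : 0 ≤ pvVmax f L := by
  induction L using List.reverseRecOn with
  | nil => simp [pvVmax]
  | append_singleton L p ih => rw [pvVmax_append]; exact le_max_of_le_left ih

theorem le_pvVmax (f : String → Int) (L : List String) (q : String) (hq : q ∈ L) :
    f q ≤ pvVmax f L := by
  induction L using List.reverseRecOn with
  | nil => simp at hq
  | append_singleton L p ih =>
    rw [pvVmax_append]
    rcases List.mem_append.1 hq with h | h
    · exact le_max_of_le_left (ih h)
    · simp at h; subst h; exact le_max_right _ _

theorem pvVmax_attained (f : String → Int) (L : List String) (h : pvVmax f L ≠ 0) :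
    ∃ q ∈ L, f q = pvVmax f L := by
  induction L using List.reverseRecOn with
  | nil => simp [pvVmax] at h
  | append_singleton L p ih =>
    rw [pvVmax_append] at h ⊢
    rcases max_choice (pvVmax f L) (f p) with hm | hm <;> rw [hm]
    · rw [hm] at h
      obtain ⟨q, hq, hfq⟩ := ih h
      exact ⟨q, by simp [hq], hfq⟩
    · exact ⟨p, by simp, rfl⟩

theorem pv_foldl_max_perm (f : String → Int) {L L' : List String} (h : L.Perm L') :
    ∀ v : Int, L.foldl (fun v p => max v (f p)) v = L'.foldl (fun v p => max v (f p)) v := by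
  induction h with
  | nil => intro v; rfl
  | cons x h ih => intro v; simp only [List.foldl_cons]; exact ih _
  | swap x y l => intro v; simp only [List.foldl_cons]; rw [max_right_comm]
  | trans h1 h2 ih1 ih2 => intro v; rw [ih1 v, ih2 v]

theorem pvVmax_perm (f : String → Int) {L L' : List String} (h : L.Perm L') :
    pvVmax f L = pvVmax f L' := pv_foldl_max_perm f h 0

theorem pvCmin_cons (a : String) (l : List String) :
    pvCmin (a :: l) = some (l.foldl min a) := by
  suffices h : ∀ (l : List String) (a : String),
      l.foldl (fun o p => some (match o with | none => p | some q => min q p)) (some a)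
        = some (l.foldl min a) by
    exact h l a
  intro l
  induction l with
  | nil => intro a; rfl
  | cons b t ih => intro a; simp only [List.foldl_cons]; exact ih (min a b)

theorem pvCmin_eq_min? (l : List String) : pvCmin l = l.min? := by
  cases l with
  | nil => rfl
  | cons a t => rw [pvCmin_cons]; rfl

theorem pvCmin_eq_some_iff (l : List String) (a : String) :
    pvCmin l = some a ↔ a ∈ l ∧ ∀ b ∈ l, a ≤ b := by
  rw [pvCmin_eq_min?]
  exact List.min?_eq_some_iff

theorem pvCmin_perm {l l' : List String} (h : l.Perm l') : pvCmin l = pvCmin l' := by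
  cases hl : pvCmin l with
  | none =>
    symm
    rw [pvCmin_eq_min?] at hl ⊢
    rw [List.min?_eq_none_iff] at hl ⊢
    rw [hl] at h
    exact h.symm.eq_nil
  | some a =>
    symm
    rw [pvCmin_eq_some_iff] at hl ⊢
    exact ⟨h.mem_iff.1 hl.1, fun b hb => hl.2 b (h.mem_iff.2 hb)⟩

theorem pv_find?_eq_head?_filter (l : List String) (pred : String → Bool) :
    l.find? pred = (l.filter pred).head? := by
  induction l with
  | nil => rfl
  | cons a t ih =>
    by_cases h : pred a
    · rw [List.find?_cons_of_pos h, List.filter_cons_of_pos h, List.head?_cons]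
    · rw [List.find?_cons_of_neg (by simp [h]), List.filter_cons_of_neg (by simp [h]), ih]

theorem pv_head?_eq_pvCmin_of_sorted (l : List String) (h : l.Pairwise (· ≤ ·)) :
    l.head? = pvCmin l := by
  cases l with
  | nil => rfl
  | cons a t =>
    symm
    rw [List.head?_cons, pvCmin_eq_some_iff]
    refine ⟨List.mem_cons_self, ?_⟩
    intro b hb
    rcases List.mem_cons.1 hb with rfl | hb
    · exact le_refl _
    · exact (List.pairwise_cons.1 h).1 b hb


theorem pvTotA_shift (skupine : List (List String)) (p : String) (a : Int) :
    skupine.foldl (fun okuzenih s =>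
      if p ∈ s then okuzenih + ((s.length : Int) - 1) else okuzenih) a
    = a + pvTotA skupine p := by
  unfold pvTotA
  induction skupine generalizing a with
  | nil => simp
  | cons s sk ih =>
    simp only [List.foldl_cons]
    rw [ih, ih (if p ∈ s then 0 + ((s.length : Int) - 1) else 0)]
    split_ifs <;> ring

theorem pvTotA_cons (s : List String) (sk : List (List String)) (p : String) :
    pvTotA (s :: sk) p = (if p ∈ s then (s.length : Int) - 1 else 0) + pvTotA sk p := by
  have h : pvTotA (s :: sk) p
      = List.foldl (fun ok s => if p ∈ s then ok + ((s.length : Int) - 1) else ok)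
          (if p ∈ s then 0 + ((s.length : Int) - 1) else 0) sk := rfl
  rw [h, pvTotA_shift]
  split_ifs <;> ring

theorem pvTotA_nonneg (skupine : List (List String)) (p : String) :
    0 ≤ pvTotA skupine p := by
  induction skupine with
  | nil => simp [pvTotA]
  | cons s sk ih =>
    rw [pvTotA_cons]
    have : (0 : Int) ≤ if p ∈ s then (s.length : Int) - 1 else 0 := by
      split_ifs with h
      · have := List.length_pos_of_mem h; omega
      · exact le_refl _
    omega

theorem pvCmin_append_singleton (l : List String) (p : String) :
    pvCmin (l ++ [p])
      = some (match pvCmin l with | none => p | some q => min q p) := by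
  simp [pvCmin, List.foldl_append]

-- A's loop characterization
theorem pvAfold_char (f : String → Int) (L : List String) :
    L.foldl (fun (acc : String × Int) p =>
      if acc.2 == f p then (min acc.1 p, f p)
      else if acc.2 < f p then (p, f p)
      else acc) ("", 0)
    = ((if pvVmax f L = 0 then ""
        else (pvCmin (L.filter (fun p => f p == pvVmax f L))).getD ""), pvVmax f L) := by
  induction L using List.reverseRecOn with
  | nil => simp [pvVmax]
  | append_singleton L p ih =>
    rw [List.foldl_append, ih, pvVmax_append]
    have hv0 := pvVmax_nonneg f L
    simp only [List.foldl_cons, List.foldl_nil]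
    rcases lt_trichotomy (pvVmax f L) (f p) with hlt | heq | hgt
    · -- strict increase: new leader p
      have hmax : max (pvVmax f L) (f p) = f p := by omega
      have hne0 : f p ≠ 0 := by omega
      have hbeq : (pvVmax f L == f p) = false := by simp; omega
      simp only [hbeq, Bool.false_eq_true, if_false, if_pos hlt, hmax, if_neg hne0]
      have hfilter : (L ++ [p]).filter (fun x => f x == f p) = [p] := by
        rw [List.filter_append]
        have h1 : L.filter (fun x => f x == f p) = [] := by
          rw [List.filter_eq_nil_iff]
          intro q hq
          have := le_pvVmax f L q hq
          simp; omega
        simp [h1]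
      rw [hfilter]
      simp [pvCmin_cons]
    · -- tie
      have hmax : max (pvVmax f L) (f p) = f p := by omega
      rw [hmax, heq]
      by_cases h0 : f p = 0
      · simp [h0, min_eq_left (pv_empty_le p)]
      · simp only [if_neg h0, beq_self_eq_true, if_true, Prod.mk.injEq, and_true]
        rw [List.filter_append]
        have hfp : List.filter (fun x => f x == f p) [p] = [p] := by simp
        rw [hfp, pvCmin_append_singleton]
        have h0' : pvVmax f L ≠ 0 := by omega
        obtain ⟨q, hq, hqv⟩ := pvVmax_attained f L h0'
        have hqp : f q = f p := by rw [hqv, heq]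
        have hFne : L.filter (fun x => f x == f p) ≠ [] := by
          intro hnil
          have : q ∈ L.filter (fun x => f x == f p) := by
            simp [List.mem_filter, hq, hqp]
          rw [hnil] at this; simp at this
        cases hm : pvCmin (L.filter (fun x => f x == f p)) with
        | none =>
          rw [pvCmin_eq_min?, List.min?_eq_none_iff] at hm
          exact absurd hm hFne
        | some m => simp
    · -- no change
      have hmax : max (pvVmax f L) (f p) = pvVmax f L := by omega
      have hbeq : (pvVmax f L == f p) = false := by simp; omega
      have hnlt : ¬ pvVmax f L < f p := by omega
      simp only [hbeq, Bool.false_eq_true, if_false, if_neg hnlt, hmax]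
      rw [List.filter_append]
      have hfp : List.filter (fun x => f x == pvVmax f L) [p] = [] := by simp; omega
      rw [hfp, List.append_nil]

-- B's loop characterization
theorem pvBfold_char (f : String → Int) (_hf : ∀ p, 0 ≤ f p) (L : List String) :
    L.foldl (fun (acc : String × Int) p =>
      if acc.2 < f p then (p, f p) else acc) ("", 0)
    = ((if pvVmax f L = 0 then ""
        else (L.find? (fun p => f p == pvVmax f L)).getD ""), pvVmax f L) := by
  induction L using List.reverseRecOn with
  | nil => simp [pvVmax]
  | append_singleton L p ih =>
    rw [List.foldl_append, ih, pvVmax_append]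
    have hv0 := pvVmax_nonneg f L
    simp only [List.foldl_cons, List.foldl_nil]
    rcases lt_trichotomy (pvVmax f L) (f p) with hlt | heq | hgt
    · have hmax : max (pvVmax f L) (f p) = f p := by omega
      have hne0 : f p ≠ 0 := by omega
      simp only [if_pos hlt, hmax, if_neg hne0, Prod.mk.injEq, and_true]
      rw [pv_find?_eq_head?_filter, List.filter_append]
      have h1 : L.filter (fun x => f x == f p) = [] := by
        rw [List.filter_eq_nil_iff]
        intro q hq
        have := le_pvVmax f L q hq
        simp; omega
      simp [h1]
    · have hmax : max (pvVmax f L) (f p) = f p := by omega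
      have hnlt : ¬ pvVmax f L < f p := by omega
      rw [hmax, heq, if_neg (lt_irrefl (f p))]
      by_cases h0 : f p = 0
      · simp [h0]
      · simp only [if_neg h0, Prod.mk.injEq, and_true]
        rw [pv_find?_eq_head?_filter, pv_find?_eq_head?_filter, List.filter_append]
        have hfp : List.filter (fun x => f x == f p) [p] = [p] := by simp
        rw [hfp]
        have h0' : pvVmax f L ≠ 0 := by omega
        obtain ⟨q, hq, hqv⟩ := pvVmax_attained f L h0'
        have hqp : f q = f p := by rw [hqv, heq]
        have hFne : L.filter (fun x => f x == f p) ≠ [] := by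
          intro hnil
          have : q ∈ L.filter (fun x => f x == f p) := by
            simp [List.mem_filter, hq, hqp]
          rw [hnil] at this; simp at this
        cases hF : L.filter (fun x => f x == f p) with
        | nil => exact absurd hF hFne
        | cons a t => simp
    · have hmax : max (pvVmax f L) (f p) = pvVmax f L := by omega
      have hnlt : ¬ pvVmax f L < f p := by omega
      rw [hmax, if_neg hnlt]
      rw [pv_find?_eq_head?_filter, pv_find?_eq_head?_filter, List.filter_append]
      have hfp : List.filter (fun x => f x == pvVmax f L) [p] = [] := by simp; omega
      rw [hfp, List.append_nil]

theorem pv_getD_inner (w : Int) (ps : List String) (hps : ps.Nodup)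
    (d : PySem.Dict String Int) (p : String) :
    (ps.foldl (fun d q => d.modify q 0 (fun x => x + w)) d).getD p 0
      = d.getD p 0 + (if p ∈ ps then w else 0) := by
  induction ps generalizing d with
  | nil => simp
  | cons q t ih =>
    obtain ⟨hqt, ht⟩ := List.nodup_cons.1 hps
    simp only [List.foldl_cons]
    rw [ih ht]
    by_cases hpq : p = q
    · subst hpq
      rw [PySem.Dict.getD_modify_self]
      simp [hqt]
    · rw [PySem.Dict.getD_modify_of_ne _ _ _ hpq]
      simp [List.mem_cons, hpq]

theorem pv_getD_build (skupine : List (List String)) (d : PySem.Dict String Int) (p : String) :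
    (skupine.foldl (fun d s =>
        (PySem.Set.ofList s).foldl
          (fun d p => d.modify p 0 (fun x => x + ((s.length : Int) - 1))) d) d).getD p 0
      = d.getD p 0 + pvTotA skupine p := by
  induction skupine generalizing d with
  | nil => simp [pvTotA]
  | cons s sk ih =>
    simp only [List.foldl_cons]
    rw [ih, pvTotA_cons,
      pv_getD_inner ((s.length : Int) - 1) (PySem.Set.ofList s) (PySem.Set.nodup_ofList s) d p]
    simp only [PySem.Set.mem_ofList]
    split_ifs <;> ring

theorem pv_mem_keys_build (skupine : List (List String)) (d : PySem.Dict String Int) (p : String) :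
    p ∈ (skupine.foldl (fun d s =>
        (PySem.Set.ofList s).foldl
          (fun d p => d.modify p 0 (fun x => x + ((s.length : Int) - 1))) d) d).keys
      ↔ p ∈ d.keys ∨ p ∈ skupine.flatMap (fun outer => outer) := by
  induction skupine generalizing d with
  | nil => simp
  | cons s sk ih =>
    simp only [List.foldl_cons]
    rw [ih, PySem.Dict.keys_foldl_modify (PySem.Set.ofList s) 0
          (fun _ _ => (fun x => x + ((s.length : Int) - 1))) d]
    rw [PySem.Set.mem_update]
    simp only [PySem.Set.mem_ofList, List.mem_flatMap]
    constructor
    · rintro ((h | h) | ⟨l, hl, hpl⟩)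
      · exact Or.inl h
      · exact Or.inr ⟨s, by simp, h⟩
      · exact Or.inr ⟨l, by simp [hl], hpl⟩
    · rintro (h | ⟨l, hl, hpl⟩)
      · exact Or.inl (Or.inl h)
      · rcases List.mem_cons.1 hl with rfl | hl
        · exact Or.inl (Or.inr hpl)
        · exact Or.inr ⟨l, hl, hpl⟩

theorem pv_nodup_keys_build (skupine : List (List String)) (d : PySem.Dict String Int)
    (hd : d.keys.Nodup) :
    (skupine.foldl (fun d s =>
        (PySem.Set.ofList s).foldl
          (fun d p => d.modify p 0 (fun x => x + ((s.length : Int) - 1))) d) d).keys.Nodup := by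
  induction skupine generalizing d with
  | nil => exact hd
  | cons s sk ih =>
    simp only [List.foldl_cons]
    exact ih _ (PySem.Dict.nodup_keys_foldl_modify_key (PySem.Set.ofList s) (fun x => x) 0
      (fun _ _ => (fun x => x + ((s.length : Int) - 1))) d hd)

theorem pv_final (skupine : List (List String)) :
    zlati_prinasalec skupine = zlati_prinasalec_alt skupine := by
  have hf : ∀ p, 0 ≤ pvTotA skupine p := pvTotA_nonneg skupine
  set f : String → Int := pvTotA skupine with hfdef
  set P : List String := PySem.Set.ofList (skupine.flatMap (fun outer => outer)) with hP
  set total : PySem.Dict String Int := skupine.foldl (fun d s =>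
      (PySem.Set.ofList s).foldl
        (fun d p => d.modify p 0 (fun x => x + ((s.length : Int) - 1))) d)
    PySem.Dict.empty with htotal
  set S : List String := PySem.List.sorted total.keys (fun x => x) false with hS
  have hgetD : ∀ p, total.getD p 0 = f p := by
    intro p
    rw [htotal, pv_getD_build]
    simp [hfdef]
  -- A's side
  have hA : zlati_prinasalec skupine
      = (if pvVmax f P = 0 then ""
         else (pvCmin (P.filter (fun p => f p == pvVmax f P))).getD "") := by
    show (P.foldl (fun (acc : String × Int) p =>
        if acc.2 == f p then (min acc.1 p, f p)
        else if acc.2 < f p then (p, f p)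
        else acc) ("", 0)).1 = _
    rw [pvAfold_char f P]
  -- B's side
  have hB : zlati_prinasalec_alt skupine
      = (if pvVmax f S = 0 then ""
         else (S.find? (fun p => f p == pvVmax f S)).getD "") := by
    show (S.foldl (fun (acc : String × Int) p =>
        if acc.2 < total.getD p 0 then (p, total.getD p 0) else acc) ("", 0)).1 = _
    simp only [hgetD]
    rw [pvBfold_char f hf S]
  rw [hA, hB]
  -- the two lists are permutations of each other
  have hkeysnodup : total.keys.Nodup := by
    rw [htotal]
    exact pv_nodup_keys_build skupine PySem.Dict.empty
      (by rw [PySem.Dict.keys_empty]; exact List.nodup_nil)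
  have hperm : S.Perm P := by
    refine (PySem.List.sorted_perm total.keys (fun x => x) false).trans ?_
    rw [(List.perm_ext_iff_of_nodup hkeysnodup (PySem.Set.nodup_ofList _))]
    intro a
    rw [PySem.Set.mem_ofList, htotal, pv_mem_keys_build]
    simp
  have hv : pvVmax f S = pvVmax f P := pvVmax_perm f hperm
  rw [← hv]
  by_cases h0 : pvVmax f S = 0
  · simp [h0]
  · simp only [h0, if_false]
    rw [pv_find?_eq_head?_filter,
      pv_head?_eq_pvCmin_of_sorted _ (List.Pairwise.filter _
        (PySem.List.sorted_pairwise total.keys (fun x => x))),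
      pvCmin_perm (hperm.filter (fun p => f p == pvVmax f S))]

-- ===== VERDICT (by name: the statement is the Claim_ definition above) =====
theorem zlati_prinasalec_spec : Claim_equal_zlati_prinasalec := by
  intro skupine _
  unfold Spec_zlati_prinasalec
  exact pv_final skupine
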